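-- pv_equiv track=rewrite | github.com/CruelMarco/BioInf_SS_2024 | programming_course/project_pdfs/project_codes/file_opener_data_plotter.py | find_non_hash_ranges
-- ===== SOURCE A (Python) =====
-- def find_non_hash_ranges(strings):
--
--     ranges = []
--
--     start_index = None
--
--     for i, string in enumerate(strings):
--
--         if not string.startswith('#'):
--
--             if start_index is None:
--
--                 start_index = i
--         else:
--
--             if start_index is not None:
--
--                 ranges.append((start_index, i - 1))
--
--                 start_index = None
--
--     # Check if there was a range that extended to the end of the list
--     if start_index is not None:
--
--         ranges.append((start_index, len(strings) - 1))
--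
--     return ranges
-- ===== SOURCE B (Python) =====
-- def find_non_hash_ranges(strings):
--     # Two-pointer run scan: jump over each non-'#' run at once; no sentinel state.
--     ranges = []
--     n = len(strings)
--     i = 0
--     while i < n:
--         if strings[i].startswith('#'):
--             i += 1
--         else:
--             j = i
--             while j + 1 < n and not strings[j + 1].startswith('#'):
--                 j += 1
--             ranges.append((i, j))
--             i = j + 1
--     return ranges
-- ===== Notes on version B (the rewrite author's own statement) =====
-- stated objective: alternative
-- what changed: Replaced A's per-element state machine (Optional start_index sentinel plus a separate end-of-list closing branch) by a two-pointer run scan that, at each non-'#' line, advances a second pointer to the end of the run and emits the range at once, so no open-range state survives the loop.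
import Mathlib
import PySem

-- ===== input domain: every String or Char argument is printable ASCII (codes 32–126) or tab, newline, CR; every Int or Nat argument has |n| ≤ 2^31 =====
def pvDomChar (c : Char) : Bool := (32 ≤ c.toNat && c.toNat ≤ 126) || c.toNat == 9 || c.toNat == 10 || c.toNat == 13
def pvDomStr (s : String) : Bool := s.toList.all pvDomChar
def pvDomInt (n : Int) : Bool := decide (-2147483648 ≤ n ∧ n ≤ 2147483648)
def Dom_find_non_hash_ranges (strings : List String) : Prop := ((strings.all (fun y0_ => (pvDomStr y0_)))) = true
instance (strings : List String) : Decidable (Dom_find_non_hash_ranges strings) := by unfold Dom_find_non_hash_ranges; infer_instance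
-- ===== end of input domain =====

-- B is an equally-costly alternative: a two-pointer run scan instead of A's sentinel state machine.

-- ===== PORT A =====
-- the for-loop over enumerate(strings), state = (ranges, start_index)
def pvALoop (st : List (Int × Int) × Option Int) (l : List (Int × String)) :
    List (Int × Int) × Option Int :=
  match l with
  | [] => st
  | p :: rest =>
    let st' :=
      if ¬ PySem.Str.startswith p.2 "#" then
        match st.2 with
        | none => (st.1, some p.1)
        | some _ => st
      else
        match st.2 with
        | some s => (st.1 ++ [(s, p.1 - 1)], none)
        | none => st
    pvALoop st' rest

def find_non_hash_ranges (strings : List String) : List (Int × Int) :=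
  let st := pvALoop ([], none) (PySem.List.enumerate strings)
  match st.2 with
  | some s => st.1 ++ [(s, (strings.length : Int) - 1)]
  | none => st.1

-- ===== PORT B =====
-- inner while: advance j to the last index of the current non-'#' run; returns (j, remaining lines)
def pvRunEnd (j : Int) (l : List String) : Int × List String :=
  match l with
  | [] => (j, [])
  | s :: rest =>
    if PySem.Str.startswith s "#" then (j, s :: rest)
    else pvRunEnd (j + 1) rest

theorem pvRunEnd_len_le (j : Int) (l : List String) : (pvRunEnd j l).2.length ≤ l.length := by
  induction l generalizing j with
  | nil => simp [pvRunEnd]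
  | cons s rest ih =>
    simp only [pvRunEnd]
    split
    · simp
    · exact le_trans (ih (j + 1)) (Nat.le_succ _)

-- outer while over the index i / the remaining lines
def pvBLoop (i : Int) (l : List String) : List (Int × Int) :=
  match l with
  | [] => []
  | s :: rest =>
    if PySem.Str.startswith s "#" then pvBLoop (i + 1) rest
    else
      let r := pvRunEnd i rest
      (i, r.1) :: pvBLoop (r.1 + 1) r.2
termination_by l.length
decreasing_by
  · simp
  · exact Nat.lt_succ_of_le (pvRunEnd_len_le i rest)

def find_non_hash_ranges_alt (strings : List String) : List (Int × Int) :=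
  pvBLoop 0 strings

-- ===== PRECONDITION & SPEC =====
def Spec_find_non_hash_ranges (strings : List String) (out : List (Int × Int)) : Prop := out = find_non_hash_ranges_alt strings
instance (strings : List String) (out : List (Int × Int)) : Decidable (Spec_find_non_hash_ranges strings out) := by unfold Spec_find_non_hash_ranges; infer_instance

-- ===== CLAIM (what is proved, stated in full; the proofs are below) =====
def Claim_equal_find_non_hash_ranges : Prop := ∀ (strings : List String), Dom_find_non_hash_ranges strings → Spec_find_non_hash_ranges strings (find_non_hash_ranges strings)

-- ===== LEMMAS AND PROOFS =====

-- closing step after A's loop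
def pvClose (st : List (Int × Int) × Option Int) (n : Int) : List (Int × Int) :=
  match st.2 with
  | some s => st.1 ++ [(s, n - 1)]
  | none => st.1

-- joint loop invariant: from a closed state A's remaining loop equals B's scan; from an
-- open state (run started at s) it equals the run's closing pair followed by B's scan.
theorem pvLoop_inv (l : List String) :
    (∀ (i : Int) (acc : List (Int × Int)),
      pvClose (pvALoop (acc, none) (PySem.List.enumerate l i)) (i + l.length) = acc ++ pvBLoop i l)
    ∧ (∀ (i s : Int) (acc : List (Int × Int)),
      pvClose (pvALoop (acc, some s) (PySem.List.enumerate l i)) (i + l.length) =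
        acc ++ (s, (pvRunEnd (i - 1) l).1) :: pvBLoop ((pvRunEnd (i - 1) l).1 + 1) (pvRunEnd (i - 1) l).2) := by
  induction l with
  | nil => simp [pvALoop, pvClose, pvBLoop, pvRunEnd, PySem.List.enumerate]
  | cons x rest ih =>
    obtain ⟨ihn, ihs⟩ := ih
    constructor
    · intro i acc
      by_cases hx : PySem.Str.startswith x "#"
      · simp only [PySem.List.enumerate_cons, pvALoop, pvBLoop, hx, not_true_eq_false]
        have := ihn (i + 1) acc
        simpa [add_assoc, add_comm, add_left_comm] using this
      · simp only [PySem.List.enumerate_cons, pvALoop, pvBLoop, hx]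
        have := ihs (i + 1) i acc
        simp only [add_sub_cancel_right] at this
        simpa [add_assoc, add_comm, add_left_comm] using this
    · intro i s acc
      by_cases hx : PySem.Str.startswith x "#"
      · simp only [PySem.List.enumerate_cons, pvALoop, pvBLoop, pvRunEnd, hx, not_true_eq_false,
          if_neg, if_pos, ite_true]
        have := ihn (i + 1) (acc ++ [(s, i - 1)])
        simp only [List.append_assoc, List.singleton_append] at this
        simpa [add_assoc, add_comm, add_left_comm] using this
      · simp only [PySem.List.enumerate_cons, pvALoop, pvRunEnd, hx]
        have := ihs (i + 1) s acc
        simp only [add_sub_cancel_right] at this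
        simpa [add_assoc, add_comm, add_left_comm] using this

-- ===== VERDICT (by name: the statement is the Claim_ definition above) =====
theorem find_non_hash_ranges_spec : Claim_equal_find_non_hash_ranges := by
  intro strings _
  show find_non_hash_ranges strings = find_non_hash_ranges_alt strings
  have h := (pvLoop_inv strings).1 0 []
  simpa [find_non_hash_ranges, find_non_hash_ranges_alt, pvClose, PySem.List.enumerate] using h
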